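-- pv_equiv track=rewrite | github.com/jhyeonjung97/tools | ruo2/convex-hull-ruo2.py | get_element_from_sub_dir
-- ===== SOURCE A (Python) =====
-- elements = ['Ru', 'Hf', 'Ta', 'W', 'Re', 'Os']
--
-- def get_element_from_sub_dir(sub_dir):
--     # sub_dir 형식: '0_Ru', '1_Hf' 등
--     parts = sub_dir.split('_')
--     if len(parts) >= 2:
--         element = '_'.join(parts[1:])  # 'RuO4', 'HfO2' 같은 경우도 처리
--         # elements 리스트에 있는 것만 사용 (예: 'RuO4' -> 'Ru'로 매칭)
--         for el in elements:
--             if element.startswith(el):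
--                 return el
--     return None
-- ===== SOURCE B (Python) =====
-- KNOWN = {'Ru', 'Hf', 'Ta', 'W', 'Re', 'Os'}
--
-- def get_element_from_sub_dir(sub_dir):
--     i = sub_dir.find('_')
--     if i == -1:
--         return None
--     element = sub_dir[i+1:]
--     for L in (2, 1):
--         p = element[:L]
--         if p in KNOWN:
--             return p
--     return None
-- ===== Notes on version B (the rewrite author's own statement) =====
-- stated objective: idiomatic
-- what changed: B locates the first underscore with str.find and slices the suffix off it instead of split/join, then probes the suffix's own length-2 and length-1 prefixes against a set of the known elements instead of scanning the element list with startswith.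
import Mathlib
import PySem

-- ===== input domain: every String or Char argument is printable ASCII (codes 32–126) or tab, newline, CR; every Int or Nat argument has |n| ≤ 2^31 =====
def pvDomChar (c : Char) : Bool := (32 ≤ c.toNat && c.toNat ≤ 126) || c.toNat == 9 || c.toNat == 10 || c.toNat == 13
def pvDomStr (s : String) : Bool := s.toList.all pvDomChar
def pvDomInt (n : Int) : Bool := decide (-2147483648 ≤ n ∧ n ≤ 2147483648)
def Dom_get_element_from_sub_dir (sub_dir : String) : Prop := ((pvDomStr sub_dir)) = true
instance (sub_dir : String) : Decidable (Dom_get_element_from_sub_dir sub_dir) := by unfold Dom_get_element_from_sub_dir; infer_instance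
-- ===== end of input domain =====

-- B re-implements A with find/slice + a set of known elements indexed by the input's own
-- prefixes instead of split/join + a linear startswith scan over the element list (objective: idiomatic).

-- ===== PORT A =====
def pvElements : List String := ["Ru", "Hf", "Ta", "W", "Re", "Os"]

def get_element_from_sub_dir (sub_dir : String) : Option String :=
  match PySem.Str.split? sub_dir "_" with
  | none => none          -- unreachable: the separator "_" is non-empty
  | some parts =>
    if 2 ≤ parts.length then
      let element := PySem.Str.join "_" (PySem.List.slice parts (some 1) none)
      pvElements.find? (fun el => PySem.Str.startswith element el)
    else none

-- ===== PORT B =====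
def pvKnown : PySem.Set String := PySem.Set.ofList ["Ru", "Hf", "Ta", "W", "Re", "Os"]

def get_element_from_sub_dir_alt (sub_dir : String) : Option String :=
  let i := PySem.Str.find sub_dir "_"
  if i = -1 then none
  else
    let element := PySem.Str.slice sub_dir (some (i + 1)) none
    [(2 : Int), 1].findSome? (fun L =>
      let p := PySem.Str.slice element none (some L)
      if pvKnown.contains p then some p else none)

-- ===== PRECONDITION & SPEC =====
def Spec_get_element_from_sub_dir (sub_dir : String) (out : Option String) : Prop := out = get_element_from_sub_dir_alt sub_dir
instance (sub_dir : String) (out : Option String) : Decidable (Spec_get_element_from_sub_dir sub_dir out) := by unfold Spec_get_element_from_sub_dir; infer_instance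

-- ===== CLAIM (what is proved, stated in full; the proofs are below) =====
def Claim_equal_get_element_from_sub_dir : Prop := ∀ (sub_dir : String), Dom_get_element_from_sub_dir sub_dir → Spec_get_element_from_sub_dir sub_dir (get_element_from_sub_dir sub_dir)

-- ===== LEMMAS AND PROOFS =====

-- Reference splitter for separator ['_']: split1 l cur is splitOn with an accumulated current chunk.
def split1 : List Char → List Char → List (List Char)
  | [], cur => [cur.reverse]
  | c :: r, cur => if c = '_' then cur.reverse :: split1 r [] else split1 r (c :: cur)

-- First index of '_' in a char list.
def idx1 : List Char → Option Nat
  | [] => none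
  | c :: r => if c = '_' then some 0 else (idx1 r).map (· + 1)

theorem split1_ne_nil (l cur : List Char) : split1 l cur ≠ [] := by
  induction l generalizing cur with
  | nil => simp [split1]
  | cons c r ih => simp only [split1]; split_ifs <;> simp [ih]

theorem go_spec (fuel : Nat) (l cur : List Char) (accs : List (List Char))
    (h : l.length < fuel) :
    PySem.Chars.splitOn.go ['_'] fuel l cur accs = accs.reverse ++ split1 l cur := by
  induction fuel generalizing l cur accs with
  | zero => omega
  | succ fuel ih =>
    cases l with
    | nil => simp [PySem.Chars.splitOn.go, split1]
    | cons c r =>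
      by_cases hc : c = '_'
      · subst hc
        have hp : List.isPrefixOf ['_'] ('_' :: r) = true := by simp [List.isPrefixOf]
        simp only [PySem.Chars.splitOn.go, hp, if_true, List.length_cons, List.length_nil,
          List.drop_succ_cons, List.drop_zero]
        rw [ih r [] (cur.reverse :: accs) (by simpa using Nat.lt_of_succ_lt_succ h)]
        simp [split1]
      · have hp : List.isPrefixOf ['_'] (c :: r) = false := by
          simp [List.isPrefixOf]; exact fun hh => hc hh.symm
        simp only [PySem.Chars.splitOn.go, hp, Bool.false_eq_true, if_false]
        rw [ih r (c :: cur) accs (by simpa using Nat.lt_of_succ_lt_succ h)]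
        simp [split1, hc]

theorem splitOn_eq_split1 (l : List Char) :
    PySem.Chars.splitOn l ['_'] = split1 l [] := by
  simpa using go_spec (l.length + 1) l [] [] (by omega)

theorem find_go_spec (l : List Char) (k : Nat) :
    PySem.Chars.find.go ['_'] l k =
      match idx1 l with
      | none => -1
      | some i => ((k + i : Nat) : Int) := by
  induction l generalizing k with
  | nil => simp [PySem.Chars.find.go, idx1, List.isEmpty]
  | cons c r ih =>
    by_cases hc : c = '_'
    · subst hc
      have hp : List.isPrefixOf ['_'] ('_' :: r) = true := by simp [List.isPrefixOf]
      simp [PySem.Chars.find.go, hp, idx1]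
    · have hp : List.isPrefixOf ['_'] (c :: r) = false := by
        simp [List.isPrefixOf]; exact fun hh => hc hh.symm
      simp only [PySem.Chars.find.go, hp, Bool.false_eq_true, if_false]
      rw [ih (k + 1)]
      cases hidx : idx1 r with
      | none => simp [idx1, hc, hidx]
      | some i => simp [idx1, hc, hidx]; ring

theorem find_eq_idx1 (l : List Char) :
    PySem.Chars.find l ['_'] =
      match idx1 l with
      | none => -1
      | some i => (i : Int) := by
  have := find_go_spec l 0
  simpa [PySem.Chars.find] using this

theorem join_split1 (l cur : List Char) :
    PySem.Chars.join ['_'] (split1 l cur) = cur.reverse ++ l := by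
  induction l generalizing cur with
  | nil => simp [split1, PySem.Chars.join, List.intercalate]
  | cons c r ih =>
    by_cases hc : c = '_'
    · subst hc
      obtain ⟨p, ps, hs⟩ : ∃ p ps, split1 r [] = p :: ps := by
        cases h : split1 r [] with
        | nil => exact absurd h (split1_ne_nil r [])
        | cons p ps => exact ⟨p, ps, rfl⟩
      have hr := ih ([] : List Char)
      simp only [List.reverse_nil, List.nil_append] at hr
      simp only [split1, PySem.Chars.join, List.intercalate, hs] at hr ⊢
      simp [hr]
    · simp only [split1, hc, if_false]
      rw [ih (c :: cur)]
      simp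

theorem tail_split1 (l cur : List Char) (i : Nat) (h : idx1 l = some i) :
    PySem.Chars.join ['_'] ((split1 l cur).tail) = l.drop (i + 1) := by
  induction l generalizing cur i with
  | nil => simp [idx1] at h
  | cons c r ih =>
    by_cases hc : c = '_'
    · subst hc
      simp only [idx1, if_true] at h
      cases h
      simp only [split1, if_true, List.drop_succ_cons, List.drop_zero, List.tail_cons]
      simpa using join_split1 r []
    · simp only [idx1, hc, if_false, Option.map_eq_some_iff] at h
      obtain ⟨j, hj, rfl⟩ := h
      simp only [split1, hc, if_false, List.drop_succ_cons]
      exact ih (c :: cur) j hj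

theorem length_split1 (l cur : List Char) :
    2 ≤ (split1 l cur).length ↔ (idx1 l).isSome := by
  induction l generalizing cur with
  | nil => simp [split1, idx1]
  | cons c r ih =>
    by_cases hc : c = '_'
    · subst hc
      have hne := split1_ne_nil r []
      simp only [split1, if_true, idx1]
      cases hs : split1 r [] with
      | nil => exact absurd hs hne
      | cons p ps => simp
    · simp only [split1, hc, if_false, idx1]
      rw [ih (c :: cur)]
      cases idx1 r <;> simp

theorem slice_take2 (xs : List Char) : PySem.List.slice xs none (some 2) = xs.take 2 := by
  simpa using PySem.List.slice_to xs (b := 2) (by norm_num)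

theorem slice_take1 (xs : List Char) : PySem.List.slice xs none (some 1) = xs.take 1 := by
  simpa using PySem.List.slice_to xs (b := 1) (by norm_num)

-- The match step: A's list scan over pvElements equals B's prefix-length probes of pvKnown.
theorem match_step (l : List Char) :
    pvElements.find? (fun el => PySem.Chars.startswith l el.toList) =
      [(2 : Int), 1].findSome? (fun L =>
        let p := String.ofList (PySem.Chars.slice l none (some L))
        if pvKnown.contains p then some p else none) := by
  match l with
  | [] => decide
  | [c] =>
    simp only [pvElements, pvKnown, PySem.Chars.startswith, List.find?, List.findSome?,
      PySem.Chars.slice_eq_listSlice, slice_take2, slice_take1, List.take,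
      PySem.Set.ofList, PySem.Set.contains]
    by_cases hc : c = 'W' <;> simp_all [List.isPrefixOf, String.ext_iff, beq_eq_decide, eq_comm]
  | c1 :: c2 :: rest =>
    simp only [pvElements, pvKnown, PySem.Chars.startswith, List.find?, List.findSome?,
      PySem.Chars.slice_eq_listSlice, slice_take2, slice_take1, List.take,
      PySem.Set.ofList, PySem.Set.contains]
    by_cases b1 : c1 = 'R' <;>
    by_cases b2 : c1 = 'H' <;>
    by_cases b3 : c1 = 'T' <;>
    by_cases b4 : c1 = 'W' <;>
    by_cases b5 : c1 = 'O' <;>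
    by_cases d1 : c2 = 'u' <;>
    by_cases d2 : c2 = 'f' <;>
    by_cases d3 : c2 = 'a' <;>
    by_cases d4 : c2 = 'e' <;>
    by_cases d5 : c2 = 's' <;>
      simp_all [List.isPrefixOf, String.ext_iff, beq_eq_decide, eq_comm]

-- ===== VERDICT (by name: the statement is the Claim_ definition above) =====
theorem get_element_from_sub_dir_spec : Claim_equal_get_element_from_sub_dir := by
  intro s _
  unfold Spec_get_element_from_sub_dir get_element_from_sub_dir get_element_from_sub_dir_alt
  have htl : ("_" : String).toList = ['_'] := by simp
  have hsplit : PySem.Str.split? s "_" = some ((split1 s.toList []).map String.ofList) := by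
    simp [PySem.Str.split?, PySem.Chars.split?, htl, splitOn_eq_split1, List.isEmpty]
  have hfind : PySem.Str.find s "_" =
      (match idx1 s.toList with | none => -1 | some i => (i : Int)) := by
    rw [PySem.Str.find_eq, htl, find_eq_idx1]
  rw [hsplit]
  cases hidx : idx1 s.toList with
  | none =>
    have hlen : ¬ 2 ≤ ((split1 s.toList []).map String.ofList).length := by
      rw [List.length_map]
      intro h
      have := (length_split1 s.toList []).mp h
      simp [hidx] at this
    simp only [hfind, hidx]
    simp only [hlen, if_false, reduceIte]
  | some i =>
    have hlen : 2 ≤ ((split1 s.toList []).map String.ofList).length := by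
      rw [List.length_map]
      exact (length_split1 s.toList []).mpr (by simp [hidx])
    have hti : ((i : Int) + 1).toNat = i + 1 := by omega
    have helem :
        PySem.Str.join "_" (PySem.List.slice ((split1 s.toList []).map String.ofList) (some 1) none)
          = PySem.Str.slice s (some ((i : Int) + 1)) none := by
      rw [PySem.List.slice_from_one, PySem.Str.join, PySem.Str.slice]
      congr 1
      rw [PySem.Chars.slice_eq_listSlice, PySem.List.slice_from _ (by omega), hti, htl,
        ← List.map_tail, List.map_map]
      have hmm : ∀ (L : List (List Char)), List.map (String.toList ∘ String.ofList) L = L := by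
        intro L
        induction L with
        | nil => simp
        | cons a t ih => simp [ih]
      rw [hmm, tail_split1 s.toList [] i hidx]
    have hel : (PySem.Str.slice s (some ((i : Int) + 1)) none).toList = s.toList.drop (i + 1) := by
      rw [PySem.Str.toList_slice, PySem.Chars.slice_eq_listSlice,
        PySem.List.slice_from _ (by omega), hti]
    have hne : ¬ ((i : Int) = -1) := by omega
    simp only [hfind, hidx, hlen, if_true, hne, if_false, helem]
    have := match_step ((PySem.Str.slice s (some ((i : Int) + 1)) none).toList)
    simp only [PySem.Str.startswith_eq, PySem.Str.slice] at this ⊢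
    exact this
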